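-- pv_equiv track=rewrite | github.com/wilmurillo-ai/Design-Assistant | .skills/openclaw-skills/skills/keylimesoda/familysearch/scripts/gedcom_query.py | _get_event
-- ===== SOURCE A (Python) =====
-- def _get_event(children, event_tag):
--     """Parse a sub-event block (BIRT, DEAT, MARR) returning {date, plac}."""
--     result = {"date": "", "plac": ""}
--     in_event = False
--     for lv, t, v in children:
--         if lv == 1 and t == event_tag:
--             in_event = True
--             continue
--         if in_event and lv == 2 and t == "DATE":
--             result["date"] = v
--         elif in_event and lv == 2 and t == "PLAC":
--             result["plac"] = v
--         elif lv == 1: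
--             in_event = False
--     return result
-- ===== SOURCE B (Python) =====
-- def _get_event(children, event_tag):
--     """Parse a sub-event block (BIRT, DEAT, MARR) returning {date, plac}."""
--     # Partition lines into blocks: each level-1 line starts a block, following
--     # lines (any other level) belong to it; lines before the first level-1 line
--     # are discarded.
--     blocks = []
--     current = None
--     for lv, t, v in children:
--         if lv == 1:
--             current = []
--             blocks.append((t, current))
--         elif current is not None:
--             current.append((lv, t, v))
--     result = {"date": "", "plac": ""}
--     for tag, body in blocks:
--         if tag == event_tag:
--             for lv, t, v in body:
--                 if lv == 2 and t == "DATE":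
--                     result["date"] = v
--                 elif lv == 2 and t == "PLAC":
--                     result["plac"] = v
--     return result
-- ===== Notes on version B (the rewrite author's own statement) =====
-- stated objective: alternative
-- what changed: Replaces the single stateful scan with an in_event flag by a two-phase decomposition: first group the lines into level-1-headed blocks, then fold the matching blocks' DATE/PLAC lines into the result.
import Mathlib
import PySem

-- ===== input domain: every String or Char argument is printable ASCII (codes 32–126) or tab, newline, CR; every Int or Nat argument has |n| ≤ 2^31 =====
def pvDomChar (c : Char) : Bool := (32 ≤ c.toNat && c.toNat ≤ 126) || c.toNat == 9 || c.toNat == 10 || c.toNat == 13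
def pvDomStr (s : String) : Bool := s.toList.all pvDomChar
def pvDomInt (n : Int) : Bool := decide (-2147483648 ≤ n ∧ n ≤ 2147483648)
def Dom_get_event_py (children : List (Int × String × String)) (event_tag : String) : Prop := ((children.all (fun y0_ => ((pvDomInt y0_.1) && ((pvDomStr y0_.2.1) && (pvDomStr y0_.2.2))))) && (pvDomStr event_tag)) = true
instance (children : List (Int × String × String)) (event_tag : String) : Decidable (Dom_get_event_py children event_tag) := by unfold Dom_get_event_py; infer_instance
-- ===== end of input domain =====

-- B replaces A's single stateful scan (in_event flag) by a two-phase decomposition: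
-- group lines into level-1-headed blocks, then fold matching blocks' DATE/PLAC lines. Same cost.

-- ===== PORT A =====
-- A's for-loop over (lv, t, v) with mutable result dict {"date","plac"} and in_event flag.
def pvALoop (event_tag : String) (st : String × String) (inEvent : Bool) :
    List (Int × String × String) → String × String
  | [] => st
  | (lv, t, v) :: rest =>
    if lv == 1 && t == event_tag then pvALoop event_tag st true rest
    else if inEvent && lv == 2 && t == "DATE" then pvALoop event_tag (v, st.2) inEvent rest
    else if inEvent && lv == 2 && t == "PLAC" then pvALoop event_tag (st.1, v) inEvent rest
    else if lv == 1 then pvALoop event_tag st false rest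
    else pvALoop event_tag st inEvent rest

def get_event_py (children : List (Int × String × String)) (event_tag : String) : List (String × String) :=
  let r := pvALoop event_tag ("", "") false children
  [("date", r.1), ("plac", r.2)]

-- ===== PORT B =====
-- phase 1 step: a level-1 line flushes the current block and starts a new one;
-- other lines are appended to the current block (discarded if before the first header).
def pvStep (st : List (String × List (Int × String × String)) × Option (String × List (Int × String × String)))
    (line : Int × String × String) :
    List (String × List (Int × String × String)) × Option (String × List (Int × String × String)) :=
  if line.1 == 1 then
    ((match st.2 with | none => st.1 | some c => st.1 ++ [c]), some (line.2.1, []))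
  else
    match st.2 with
    | none => st
    | some c => (st.1, some (c.1, c.2 ++ [line]))

def pvMkBlocks (children : List (Int × String × String)) :
    List (String × List (Int × String × String)) :=
  let r := children.foldl pvStep ([], none)
  match r.2 with | none => r.1 | some c => r.1 ++ [c]

-- phase 2 line update
def pvUpd (st : String × String) (line : Int × String × String) : String × String :=
  if line.1 == 2 && line.2.1 == "DATE" then (line.2.2, st.2)
  else if line.1 == 2 && line.2.1 == "PLAC" then (st.1, line.2.2)
  else st

def get_event_py_alt (children : List (Int × String × String)) (event_tag : String) : List (String × String) :=
  let r := (pvMkBlocks children).foldl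
    (fun st b => if b.1 == event_tag then b.2.foldl pvUpd st else st) ("", "")
  [("date", r.1), ("plac", r.2)]

-- ===== PRECONDITION & SPEC =====
def Spec_get_event_py (children : List (Int × String × String)) (event_tag : String) (out : List (String × String)) : Prop := out = get_event_py_alt children event_tag
instance (children : List (Int × String × String)) (event_tag : String) (out : List (String × String)) : Decidable (Spec_get_event_py children event_tag out) := by unfold Spec_get_event_py; infer_instance

-- ===== CLAIM (what is proved, stated in full; the proofs are below) =====
def Claim_equal_get_event_py : Prop := ∀ (children : List (Int × String × String)) (event_tag : String), Dom_get_event_py children event_tag → Spec_get_event_py children event_tag (get_event_py children event_tag)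

-- ===== LEMMAS AND PROOFS =====

-- recursive characterisation of pvMkBlocks, used only in the proof
def pvTakeBlock : List (Int × String × String) →
    List (Int × String × String) × List (Int × String × String)
  | [] => ([], [])
  | (lv, t, v) :: rest =>
    if lv == 1 then ([], (lv, t, v) :: rest)
    else
      let r := pvTakeBlock rest
      ((lv, t, v) :: r.1, r.2)

theorem pvTakeBlock_len (xs : List (Int × String × String)) :
    (pvTakeBlock xs).2.length ≤ xs.length := by
  induction xs with
  | nil => simp [pvTakeBlock]
  | cons h rest ih =>
    obtain ⟨lv, t, v⟩ := h
    simp only [pvTakeBlock]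
    split
    · simp
    · simpa using Nat.le_succ_of_le ih

def pvBlocksOf : List (Int × String × String) → List (String × List (Int × String × String))
  | [] => []
  | (lv, t, v) :: rest =>
    if lv == 1 then (t, (pvTakeBlock rest).1) :: pvBlocksOf (pvTakeBlock rest).2
    else pvBlocksOf rest
termination_by xs => xs.length
decreasing_by
  · exact Nat.lt_succ_of_le (pvTakeBlock_len rest)
  · simp

def pvFinish (st : List (String × List (Int × String × String)) × Option (String × List (Int × String × String))) :
    List (String × List (Int × String × String)) :=
  match st.2 with | none => st.1 | some c => st.1 ++ [c]

theorem pvFoldStep (xs : List (Int × String × String)) :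
    (∀ bs, pvFinish (xs.foldl pvStep (bs, none)) = bs ++ pvBlocksOf xs) ∧
    (∀ bs tag ls, pvFinish (xs.foldl pvStep (bs, some (tag, ls))) =
      bs ++ (tag, ls ++ (pvTakeBlock xs).1) :: pvBlocksOf (pvTakeBlock xs).2) := by
  induction xs with
  | nil => simp [pvFinish, pvTakeBlock, pvBlocksOf]
  | cons h rest ih =>
    obtain ⟨lv, t, v⟩ := h
    by_cases hlv : lv = 1
    · subst hlv
      constructor
      · intro bs
        simp only [List.foldl_cons, pvStep]
        rw [if_pos (by simp)]
        simp only [ih.2, pvBlocksOf]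
        simp
      · intro bs tag ls
        simp only [List.foldl_cons, pvStep]
        rw [if_pos (by simp)]
        simp only [ih.2, pvTakeBlock]
        rw [if_pos (by simp)]
        simp [pvBlocksOf]
    · have hne : (lv == (1:Int)) = false := by simp [hlv]
      constructor
      · intro bs
        simp only [List.foldl_cons, pvStep, hne, Bool.false_eq_true, if_false]
        simp only [ih.1, pvBlocksOf, hne, Bool.false_eq_true, if_false]
      · intro bs tag ls
        simp only [List.foldl_cons, pvStep, hne, Bool.false_eq_true, if_false]
        simp only [ih.2, pvTakeBlock, hne, Bool.false_eq_true, if_false]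
        simp

theorem pvMkBlocks_eq (xs : List (Int × String × String)) :
    pvMkBlocks xs = pvBlocksOf xs := by
  have := (pvFoldStep xs).1 []
  simpa [pvMkBlocks, pvFinish] using this

-- blocks skip a leading non-header run
theorem pvBlocksOf_takeBlock (xs : List (Int × String × String)) :
    pvBlocksOf (pvTakeBlock xs).2 = pvBlocksOf xs := by
  induction xs with
  | nil => simp [pvTakeBlock]
  | cons h rest ih =>
    obtain ⟨lv, t, v⟩ := h
    by_cases hlv : lv = 1
    · subst hlv
      simp [pvTakeBlock]
    · have hne : (lv == (1:Int)) = false := by simp [hlv]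
      simp only [pvTakeBlock, hne, Bool.false_eq_true, if_false]
      rw [ih]
      simp [pvBlocksOf, hne]

def pvBRun (event_tag : String) (st : String × String)
    (bs : List (String × List (Int × String × String))) : String × String :=
  bs.foldl (fun st b => if b.1 == event_tag then b.2.foldl pvUpd st else st) st

-- main invariant: A's scan equals B's block fold, for both flag values
theorem pvMain (tag : String) (xs : List (Int × String × String)) :
    (∀ st, pvALoop tag st false xs = pvBRun tag st (pvBlocksOf xs)) ∧
    (∀ st, pvALoop tag st true xs =
      pvBRun tag ((pvTakeBlock xs).1.foldl pvUpd st) (pvBlocksOf (pvTakeBlock xs).2)) := by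
  induction xs with
  | nil => simp [pvALoop, pvBRun, pvTakeBlock, pvBlocksOf]
  | cons h rest ih =>
    obtain ⟨lv, t, v⟩ := h
    constructor <;> intro st <;> by_cases hlv : lv = 1
    · -- inEvent = false, header line
      subst hlv
      by_cases ht : t = tag <;>
        simp [pvALoop, pvBRun, pvBlocksOf, ht, ih.1, ih.2, pvBlocksOf_takeBlock]
    · -- inEvent = false, non-header line: skipped by both
      simp [pvALoop, pvBRun, pvBlocksOf, hlv, ih.1]
    · -- inEvent = true, header line
      subst hlv
      by_cases ht : t = tag <;>
        simp [pvALoop, pvBRun, pvBlocksOf, pvTakeBlock, ht, ih.1, ih.2,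
          pvBlocksOf_takeBlock]
    · -- inEvent = true, body line
      have h1 : (lv == (1 : Int)) = false := by simp [hlv]
      by_cases h2 : lv = 2
      · subst h2
        by_cases hd : t = "DATE"
        · simp [pvALoop, pvTakeBlock, pvUpd, hd, ih.2]
        · by_cases hp : t = "PLAC" <;>
            simp [pvALoop, pvTakeBlock, pvUpd, hd, hp, ih.2]
      · have h2f : (lv == (2 : Int)) = false := by simp [h2]
        simp [pvALoop, pvTakeBlock, pvUpd, h1, h2f, ih.2]

-- ===== VERDICT (by name: the statement is the Claim_ definition above) =====
theorem get_event_py_spec : Claim_equal_get_event_py := by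
  intro children event_tag _
  unfold Spec_get_event_py get_event_py get_event_py_alt
  rw [pvMkBlocks_eq]
  rw [(pvMain event_tag children).1 ("", "")]
  rfl
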